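-- pv_equiv track=rewrite | github.com/polishplankton/python_projects | cribbage.py | valid_hand
-- ===== SOURCE A (Python) =====
-- def valid_hand(hand):
--     ''' Make sure argument is in value-suit-value-suit... format '''
--
--     Values = ('1', '2', '3', '4', '5', '6', '7',
--               '8', '9', 'T', 'J', 'Q', 'K')
--     Suits = ('S', 'C', 'H', 'D')
--
--     if len(hand) != 10:
--         return False
--
--     # check for invalid values or suits
--     for n in (0, 2, 4, 6, 8):
--         if hand[n:n+1] not in Values:
--             return False
--         if hand[n+1:n+2] not in Suits:
--             return False
--
--     # check for duplicate cards
--     for m in range(4):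
--         for n in range(m+1, 5):
--             if hand[2*m:2*m+2] == hand[2*n:2*n+2]:
--                 return False
--
--     return True
-- ===== SOURCE B (Python) =====
-- def valid_hand(hand):
--     ''' Make sure argument is in value-suit-value-suit... format '''
--     Values = {'1', '2', '3', '4', '5', '6', '7', '8', '9', 'T', 'J', 'Q', 'K'}
--     Suits = {'S', 'C', 'H', 'D'}
--
--     if len(hand) != 10:
--         return False
--
--     cards = list(zip(hand[0::2], hand[1::2]))
--     if not all(v in Values and s in Suits for v, s in cards):
--         return False
--     return len(set(cards)) == 5
-- ===== Notes on version B (the rewrite author's own statement) =====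
-- stated objective: simpler
-- what changed: B splits the hand into five cards by zipping the two step slices hand[0::2] and hand[1::2], validates each card's value/suit characters by set membership, and replaces A's nested O(k^2) pairwise duplicate scan over index slices with a single len(set(cards)) == 5 check.
import Mathlib
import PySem

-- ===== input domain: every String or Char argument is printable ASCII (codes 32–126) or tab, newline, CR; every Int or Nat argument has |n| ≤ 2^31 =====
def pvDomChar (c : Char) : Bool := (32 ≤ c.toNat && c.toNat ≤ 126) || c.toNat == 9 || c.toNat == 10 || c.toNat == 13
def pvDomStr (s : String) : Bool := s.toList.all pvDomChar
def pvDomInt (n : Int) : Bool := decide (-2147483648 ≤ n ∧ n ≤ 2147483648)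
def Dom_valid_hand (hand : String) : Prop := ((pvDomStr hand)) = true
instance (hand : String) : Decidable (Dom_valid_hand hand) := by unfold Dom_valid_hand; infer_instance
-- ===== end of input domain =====

-- B replaces A's index-slicing format loop and O(k²) nested pairwise duplicate scan by a
-- zip of two step slices into cards and a set-cardinality uniqueness check (objective: simpler).


-- ===== PORT A =====
-- A's Values / Suits tuples of one-character strings (as code-point lists)
def pvValuesA : List (List Char) := [['1'],['2'],['3'],['4'],['5'],['6'],['7'],['8'],['9'],['T'],['J'],['Q'],['K']]
def pvSuitsA : List (List Char) := [['S'],['C'],['H'],['D']]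

-- A's body over the string's code points: length guard, the format loop over (0,2,4,6,8)
-- (slices hand[n:n+1], hand[n+1:n+2] tested against the tuples), then the nested pairwise
-- duplicate loop over 2-character slices ('for … if cond: return False' = List.all of ¬cond).
def pvCheckA (l : List Char) : Bool :=
  if l.length ≠ 10 then false
  else
    (([0,2,4,6,8] : List Int).all fun n =>
        pvValuesA.contains (PySem.List.slice l (some n) (some (n+1))) &&
        pvSuitsA.contains (PySem.List.slice l (some (n+1)) (some (n+2))))
    &&
    ((PySem.List.pyRange 0 4 1).all fun m =>
      (PySem.List.pyRange (m+1) 5 1).all fun n =>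
        !(PySem.List.slice l (some (2*m)) (some (2*m+2)) == PySem.List.slice l (some (2*n)) (some (2*n+2))))

def valid_hand (hand : String) : Bool := pvCheckA hand.toList

-- ===== PORT B =====
-- B's Values / Suits sets of characters
def pvValues : List Char := ['1','2','3','4','5','6','7','8','9','T','J','Q','K']
def pvSuits : List Char := ['S','C','H','D']

-- B's body: length guard, cards = zip(hand[0::2], hand[1::2]) (step slices never raise:
-- slice? with step 2 is always some, getD [] totalizes), per-card membership check,
-- then len(set(cards)) == 5.
def pvCheckB (l : List Char) : Bool :=
  if l.length ≠ 10 then false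
  else
    let cards := List.zip ((PySem.List.slice? l (some 0) none 2).getD [])
                          ((PySem.List.slice? l (some 1) none 2).getD [])
    (cards.all fun c => pvValues.contains c.1 && pvSuits.contains c.2)
    &&
    (PySem.Set.len (PySem.Set.ofList cards) == 5)

def valid_hand_alt (hand : String) : Bool := pvCheckB hand.toList

-- ===== PRECONDITION & SPEC =====
def Spec_valid_hand (hand : String) (out : Bool) : Prop := out = valid_hand_alt hand
instance (hand : String) (out : Bool) : Decidable (Spec_valid_hand hand out) := by unfold Spec_valid_hand; infer_instance

-- ===== CLAIM (what is proved, stated in full; the proofs are below) =====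
def Claim_equal_valid_hand : Prop := ∀ (hand : String), Dom_valid_hand hand → Spec_valid_hand hand (valid_hand hand)

-- ===== LEMMAS AND PROOFS =====

-- set(xs) has as many elements as xs exactly when xs has no duplicates
theorem pv_ofList_len {α : Type} [BEq α] [LawfulBEq α] (xs : List α) :
    (PySem.Set.ofList xs).length = xs.length ↔ xs.Nodup := by
  letI : DecidableEq α := fun a b => decidable_of_iff ((a == b) = true) (by simp)
  have hn := PySem.Set.nodup_ofList (xs := xs)
  have hfin : (PySem.Set.ofList xs).toFinset = xs.toFinset := by
    ext x; simp [List.mem_toFinset, PySem.Set.mem_ofList]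
  have h1 : (PySem.Set.ofList xs).toFinset.card = (PySem.Set.ofList xs).length :=
    List.toFinset_card_of_nodup hn
  have h2 : xs.toFinset.card = xs.length ↔ xs.Nodup := by
    simpa using Multiset.toFinset_card_eq_card_iff_nodup (m := (xs : Multiset α))
  rw [← h1, hfin]; exact h2

-- the two bodies agree on a ten-character hand
set_option maxRecDepth 4096 in
theorem pv_main (c0 c1 c2 c3 c4 c5 c6 c7 c8 c9 : Char) :
    pvCheckA [c0,c1,c2,c3,c4,c5,c6,c7,c8,c9] = pvCheckB [c0,c1,c2,c3,c4,c5,c6,c7,c8,c9] := by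
  have e1 : PySem.List.pyRange 0 4 1 = [0,1,2,3] := by decide
  have e2 : PySem.List.pyRange (0+1) 5 1 = [1,2,3,4] := by decide
  have e3 : PySem.List.pyRange (1+1) 5 1 = [2,3,4] := by decide
  have e4 : PySem.List.pyRange (2+1) 5 1 = [3,4] := by decide
  have e5 : PySem.List.pyRange (3+1) 5 1 = [4] := by decide
  have eS0 : PySem.List.slice? [c0,c1,c2,c3,c4,c5,c6,c7,c8,c9] (some 0) none 2 = some [c0,c2,c4,c6,c8] := by
    simp [PySem.List.slice?, PySem.List.sliceIndices, List.range_succ]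
  have eS1 : PySem.List.slice? [c0,c1,c2,c3,c4,c5,c6,c7,c8,c9] (some 1) none 2 = some [c1,c3,c5,c7,c9] := by
    simp [PySem.List.slice?, PySem.List.sliceIndices, List.range_succ]
  have hlen : ((PySem.Set.ofList [(c0,c1),(c2,c3),(c4,c5),(c6,c7),(c8,c9)]).length : Int) = 5
      ↔ List.Nodup [(c0,c1),(c2,c3),(c4,c5),(c6,c7),(c8,c9)] := by
    rw [← pv_ofList_len [(c0,c1),(c2,c3),(c4,c5),(c6,c7),(c8,c9)]]
    norm_cast
  have hv : ∀ c : Char, [c] ∈ pvValuesA ↔ c ∈ pvValues := by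
    intro c; simp [pvValuesA, pvValues]
  have hs : ∀ c : Char, [c] ∈ pvSuitsA ↔ c ∈ pvSuits := by
    intro c; simp [pvSuitsA, pvSuits]
  rw [← Bool.coe_iff_coe]
  simp only [pvCheckA, pvCheckB, e1, List.all_cons, List.all_nil, e2, e3, e4, e5, eS0, eS1]
  simp [PySem.List.slice, PySem.Set.len, PySem.List.clampIdx]
  rw [hlen]
  simp only [hv, hs, List.nodup_cons, List.mem_cons, List.not_mem_nil, List.nodup_nil,
             Prod.mk.injEq, not_or, or_false, and_true, not_and_or, not_false_iff]

-- the two bodies agree on every code-point list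
theorem pv_core (l : List Char) : pvCheckA l = pvCheckB l := by
  by_cases h : l.length = 10
  · obtain ⟨c0,c1,c2,c3,c4,c5,c6,c7,c8,c9,rfl⟩ :
        ∃ c0 c1 c2 c3 c4 c5 c6 c7 c8 c9, l = [c0,c1,c2,c3,c4,c5,c6,c7,c8,c9] := by
      rcases l with _|⟨c0,_|⟨c1,_|⟨c2,_|⟨c3,_|⟨c4,_|⟨c5,_|⟨c6,_|⟨c7,_|⟨c8,_|⟨c9,_|⟨c10,l⟩⟩⟩⟩⟩⟩⟩⟩⟩⟩⟩ <;>
        first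
          | exact ⟨c0,c1,c2,c3,c4,c5,c6,c7,c8,c9,rfl⟩
          | (exfalso; simp at h)
    exact pv_main c0 c1 c2 c3 c4 c5 c6 c7 c8 c9
  · simp [pvCheckA, pvCheckB, h]

-- ===== VERDICT (by name: the statement is the Claim_ definition above) =====
theorem valid_hand_spec : Claim_equal_valid_hand := by
  intro hand _
  unfold Spec_valid_hand valid_hand valid_hand_alt
  exact pv_core hand.toList
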